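-- pv_equiv track=rewrite | github.com/sowbug/b39tools | b39tools/mdformatter.py | RenderWordListAsMatrix
-- ===== SOURCE A (Python) =====
-- def RenderWordListAsMatrix(text):
--   words = text.split()
--   text = ""
--   i = 0
--   for word in words:
--     text += f"{i+1:>2} {word:<8} "
--     i += 1
--     if i % 4 == 0:
--       text += "\n"
--   return text
-- ===== SOURCE B (Python) =====
-- def RenderWordListAsMatrix(text):
--   words = text.split()
--   tokens = [f"{n:>2} {w:<8} " for n, w in enumerate(words, 1)]
--   rows = ["".join(tokens[k:k + 4]) for k in range(0, len(tokens), 4)]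
--   out = "\n".join(rows)
--   if tokens and len(tokens) % 4 == 0:
--     out += "\n"
--   return out
-- ===== Notes on version B (the rewrite author's own statement) =====
-- stated objective: simpler
-- what changed: B builds the list of formatted tokens once, slices it into rows of four joined by newlines, instead of A's single stateful loop that interleaves formatting with a running counter and mod-4 newline insertion.
import Mathlib
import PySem

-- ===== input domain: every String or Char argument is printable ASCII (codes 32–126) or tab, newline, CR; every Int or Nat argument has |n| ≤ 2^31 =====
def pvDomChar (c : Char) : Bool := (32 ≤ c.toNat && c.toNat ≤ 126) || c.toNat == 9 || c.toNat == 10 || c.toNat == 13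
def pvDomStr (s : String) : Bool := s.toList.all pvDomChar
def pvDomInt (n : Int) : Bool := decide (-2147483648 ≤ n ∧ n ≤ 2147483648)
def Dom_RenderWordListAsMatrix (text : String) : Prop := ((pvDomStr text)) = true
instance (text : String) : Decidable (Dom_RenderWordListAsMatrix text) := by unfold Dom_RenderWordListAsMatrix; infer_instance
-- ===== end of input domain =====

-- B builds the token list once and assembles it into rows of four joined by newlines,
-- instead of A's stateful loop with a running counter and mod-4 newline insertion (objective: simpler).

-- f"{n:>2} {w:<8} " : the shared token formatter (exact: right-justify to 2, left-justify to 8, spaces)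
def pvTok (n : Int) (w : String) : List Char :=
  (List.replicate (2 - (PySem.Int.toStr n).toList.length) ' ' ++ (PySem.Int.toStr n).toList)
    ++ [' '] ++ (w.toList ++ List.replicate (8 - w.toList.length) ' ') ++ [' ']

-- ===== PORT A =====
def RenderWordListAsMatrix (text : String) : String :=
  let words := PySem.Str.split₀ text
  let r := words.foldl (fun (s : List Char × Int) w =>
      let t := s.1 ++ pvTok (s.2 + 1) w
      let i := s.2 + 1
      (if PySem.Int.mod i 4 == 0 then t ++ ['\n'] else t, i)) ([], 0)
  String.ofList r.1

-- ===== PORT B =====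
-- rows = ["".join(tokens[k:k+4]) for k in range(0, len(tokens), 4)]
def pvChunkRows : List (List Char) → List (List Char)
  | [] => []
  | t :: ts => PySem.Chars.join [] (t :: ts.take 3) :: pvChunkRows (ts.drop 3)
  termination_by ts => ts.length
  decreasing_by simp

def RenderWordListAsMatrix_alt (text : String) : String :=
  let words := PySem.Str.split₀ text
  let tokens := (PySem.List.enumerate words 1).map (fun p => pvTok p.1 p.2)
  let out := PySem.Chars.join ['\n'] (pvChunkRows tokens)
  String.ofList (if !tokens.isEmpty && tokens.length % 4 == 0 then out ++ ['\n'] else out)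

-- ===== PRECONDITION & SPEC =====
def Spec_RenderWordListAsMatrix (text : String) (out : String) : Prop := out = RenderWordListAsMatrix_alt text
instance (text : String) (out : String) : Decidable (Spec_RenderWordListAsMatrix text out) := by unfold Spec_RenderWordListAsMatrix; infer_instance

-- ===== CLAIM (what is proved, stated in full; the proofs are below) =====
def Claim_equal_RenderWordListAsMatrix : Prop := ∀ (text : String), Dom_RenderWordListAsMatrix text → Spec_RenderWordListAsMatrix text (RenderWordListAsMatrix text)

-- ===== LEMMAS AND PROOFS =====

-- the text A's loop appends when started with counter i
def pvRender (i : Int) : List String → List Char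
  | [] => []
  | w :: ws => pvTok (i + 1) w ++ (if PySem.Int.mod (i + 1) 4 == 0 then ['\n'] else [])
      ++ pvRender (i + 1) ws

lemma pvFoldA (ws : List String) (acc : List Char) (i : Int) :
    (ws.foldl (fun (s : List Char × Int) w =>
      let t := s.1 ++ pvTok (s.2 + 1) w
      let i := s.2 + 1
      (if PySem.Int.mod i 4 == 0 then t ++ ['\n'] else t, i)) (acc, i)).1
      = acc ++ pvRender i ws := by
  induction ws generalizing acc i with
  | nil => simp [pvRender]
  | cons w ws ih =>
      have key : (if PySem.Int.mod (i + 1) 4 == 0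
            then (acc ++ pvTok (i + 1) w) ++ ['\n'] else acc ++ pvTok (i + 1) w)
          = acc ++ (pvTok (i + 1) w
              ++ (if PySem.Int.mod (i + 1) 4 == 0 then ['\n'] else [])) := by
        split <;> simp
      show (ws.foldl _ ((if PySem.Int.mod (i + 1) 4 == 0
      then (acc ++ pvTok (i + 1) w) ++ ['\n'] else acc ++ pvTok (i + 1) w), i + 1)).1 = _
      rw [key, ih]
      simp [pvRender]

-- tokens of B, numbered from n
def pvTokensFrom (n : Int) : List String → List (List Char)
  | [] => []
  | w :: ws => pvTok n w :: pvTokensFrom (n + 1) ws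

lemma pvEnumMap (ws : List String) (n : Int) :
    (PySem.List.enumerate ws n).map (fun p => pvTok p.1 p.2) = pvTokensFrom n ws := by
  induction ws generalizing n with
  | nil => simp [pvTokensFrom, PySem.List.enumerate_nil]
  | cons w ws ih => simp [pvTokensFrom, PySem.List.enumerate_cons, ih]

lemma pvTokensFrom_length (n : Int) (ws : List String) :
    (pvTokensFrom n ws).length = ws.length := by
  induction ws generalizing n with
  | nil => rfl
  | cons w ws ih => simp [pvTokensFrom, ih]

lemma pvCore (ws : List String) (i : Int) (h : i % 4 = 0) :
    pvRender i ws = PySem.Chars.join ['\n'] (pvChunkRows (pvTokensFrom (i + 1) ws))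
      ++ (if ws ≠ [] ∧ ws.length % 4 = 0 then ['\n'] else []) := by
  match ws with
  | [] => simp [pvRender, pvTokensFrom, pvChunkRows]
  | [a] =>
      have h1 : ¬ (4:Int) ∣ (i + 1) := by omega
      simp [pvRender, pvTokensFrom, pvChunkRows, h1, PySem.Chars.join, List.intercalate]
  | [a, b] =>
      have h1 : ¬ (4:Int) ∣ (i + 1) := by omega
      have h2 : ¬ (4:Int) ∣ (i + 1 + 1) := by omega
      simp [pvRender, pvTokensFrom, pvChunkRows, h1, h2, PySem.Chars.join, List.intercalate]
  | [a, b, c] =>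
      have h1 : ¬ (4:Int) ∣ (i + 1) := by omega
      have h2 : ¬ (4:Int) ∣ (i + 1 + 1) := by omega
      have h3 : ¬ (4:Int) ∣ (i + 1 + 1 + 1) := by omega
      simp [pvRender, pvTokensFrom, pvChunkRows, h1, h2, h3, PySem.Chars.join, List.intercalate]
  | [a, b, c, d] =>
      have h1 : ¬ (4:Int) ∣ (i + 1) := by omega
      have h2 : ¬ (4:Int) ∣ (i + 1 + 1) := by omega
      have h3 : ¬ (4:Int) ∣ (i + 1 + 1 + 1) := by omega
      have h4 : (4:Int) ∣ (i + 1 + 1 + 1 + 1) := by omega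
      simp [pvRender, pvTokensFrom, pvChunkRows, h1, h2, h3, h4, PySem.Chars.join, List.intercalate]
  | a :: b :: c :: d :: r :: rs =>
      have h1 : ¬ (4:Int) ∣ (i + 1) := by omega
      have h2 : ¬ (4:Int) ∣ (i + 1 + 1) := by omega
      have h3 : ¬ (4:Int) ∣ (i + 1 + 1 + 1) := by omega
      have h4 : (4:Int) ∣ (i + 1 + 1 + 1 + 1) := by omega
      have ih := pvCore (r :: rs) (i + 1 + 1 + 1 + 1) (by omega)
      rw [show pvRender i (a :: b :: c :: d :: r :: rs)
            = pvTok (i + 1) a ++ pvTok (i + 1 + 1) b ++ pvTok (i + 1 + 1 + 1) c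
              ++ pvTok (i + 1 + 1 + 1 + 1) d ++ ['\n']
              ++ pvRender (i + 1 + 1 + 1 + 1) (r :: rs) from by
          simp [pvRender, h1, h2, h3, h4]]
      rw [ih]
      rw [show pvTokensFrom (i + 1) (a :: b :: c :: d :: r :: rs)
            = pvTok (i + 1) a :: pvTok (i + 1 + 1) b :: pvTok (i + 1 + 1 + 1) c
              :: pvTok (i + 1 + 1 + 1 + 1) d :: pvTokensFrom (i + 1 + 1 + 1 + 1 + 1) (r :: rs)
            from by simp [pvTokensFrom]]
      rw [show pvChunkRows (pvTok (i + 1) a :: pvTok (i + 1 + 1) b :: pvTok (i + 1 + 1 + 1) c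
              :: pvTok (i + 1 + 1 + 1 + 1) d :: pvTokensFrom (i + 1 + 1 + 1 + 1 + 1) (r :: rs))
            = PySem.Chars.join [] [pvTok (i + 1) a, pvTok (i + 1 + 1) b, pvTok (i + 1 + 1 + 1) c,
                pvTok (i + 1 + 1 + 1 + 1) d]
              :: pvChunkRows (pvTokensFrom (i + 1 + 1 + 1 + 1 + 1) (r :: rs)) from by
          rw [pvChunkRows]; simp]
      have hne : pvChunkRows (pvTokensFrom (i + 1 + 1 + 1 + 1 + 1) (r :: rs)) ≠ [] := by
        rw [show pvTokensFrom (i + 1 + 1 + 1 + 1 + 1) (r :: rs)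
              = pvTok (i + 1 + 1 + 1 + 1 + 1) r :: pvTokensFrom (i + 1 + 1 + 1 + 1 + 1 + 1) rs
              from by simp [pvTokensFrom], pvChunkRows]
        simp
      obtain ⟨q, qs, hq⟩ := List.exists_cons_of_ne_nil hne
      rw [hq, PySem.Chars.join_cons_cons, ← hq]
      have hcond : ((a :: b :: c :: d :: r :: rs) ≠ [] ∧ (a :: b :: c :: d :: r :: rs).length % 4 = 0)
          ↔ ((r :: rs) ≠ [] ∧ (r :: rs).length % 4 = 0) := by simp; omega
      rw [if_congr hcond rfl rfl]
      simp [PySem.Chars.join, List.intercalate]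

-- ===== VERDICT (by name: the statement is the Claim_ definition above) =====
theorem RenderWordListAsMatrix_spec : Claim_equal_RenderWordListAsMatrix := by
  intro text _
  unfold Spec_RenderWordListAsMatrix RenderWordListAsMatrix RenderWordListAsMatrix_alt
  simp only [pvFoldA, pvEnumMap, List.nil_append]
  rw [pvCore (PySem.Str.split₀ text) 0 (by decide)]
  congr 1
  have hlen := pvTokensFrom_length 1 (PySem.Str.split₀ text)
  by_cases hw : PySem.Str.split₀ text = []
  · simp [hw, pvTokensFrom]
  · have hne : (pvTokensFrom 1 (PySem.Str.split₀ text)).isEmpty = false := by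
      simp only [List.isEmpty_eq_false_iff, ne_eq, ← List.length_pos_iff, hlen]
      have := List.length_pos_of_ne_nil hw
      omega
    by_cases hm : (PySem.Str.split₀ text).length % 4 = 0
    · simp [hne, hlen, hm, hw]
    · simp [hne, hlen, hm, hw]
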